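-- pv_equiv track=rewrite | github.com/sergehall/webdev-coursework | frontend/public/code-playground/CS87A/mod-3/A03.py | max_move_player
-- ===== SOURCE A (Python) =====
-- def max_move_player(diagonal):
--     max_move = 0
--     incr = 2
--     for i in range(2, diagonal + 1):
--         if i == 2:
--             max_move = 2
--         if i > 2:
--             max_move += incr
--             if i % 2 != 0:
--                 incr += 2
--     return max_move
-- ===== SOURCE B (Python) =====
-- def max_move_player(diagonal):
--     # closed form: for diagonal >= 2 the loop accumulates floor(diagonal**2 / 2)
--     if diagonal < 2:
--         return 0
--     return diagonal * diagonal // 2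
-- ===== Notes on version B (the rewrite author's own statement) =====
-- stated objective: faster
-- what changed: Replaced the O(n) loop that accumulates growing even increments by the closed-form floor(diagonal^2/2) (0 below 2).
import Mathlib
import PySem

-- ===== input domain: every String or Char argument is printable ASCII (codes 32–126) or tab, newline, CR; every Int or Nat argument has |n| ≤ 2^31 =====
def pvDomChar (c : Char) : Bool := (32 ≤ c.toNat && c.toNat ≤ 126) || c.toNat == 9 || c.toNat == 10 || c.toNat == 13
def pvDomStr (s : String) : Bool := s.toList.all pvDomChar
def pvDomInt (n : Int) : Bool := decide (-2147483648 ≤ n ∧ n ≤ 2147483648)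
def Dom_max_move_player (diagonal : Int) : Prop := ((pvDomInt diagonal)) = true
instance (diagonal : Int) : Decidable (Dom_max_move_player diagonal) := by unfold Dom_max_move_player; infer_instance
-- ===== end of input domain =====

-- B replaces A's O(n) increment-accumulation loop with the closed form ⌊diagonal²/2⌋ (0 below 2); timed faster (asymptotic).


-- ===== PORT A =====
-- state (max_move, incr); loop for i in range(2, diagonal+1)
def max_move_player (diagonal : Int) : Int :=
  ((PySem.List.pyRange 2 (diagonal + 1) 1).foldl
    (fun (st : Int × Int) (i : Int) =>
      let max_move := if i = 2 then 2 else st.1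
      if i > 2 then
        (max_move + st.2, if PySem.Int.mod i 2 ≠ 0 then st.2 + 2 else st.2)
      else
        (max_move, st.2))
    (0, 2)).1

-- ===== PORT B =====
def max_move_player_alt (diagonal : Int) : Int :=
  if diagonal < 2 then 0 else PySem.Int.floordiv (diagonal * diagonal) 2

-- ===== PRECONDITION & SPEC =====
def Spec_max_move_player (diagonal : Int) (out : Int) : Prop := out = max_move_player_alt diagonal
instance (diagonal : Int) (out : Int) : Decidable (Spec_max_move_player diagonal out) := by unfold Spec_max_move_player; infer_instance

-- ===== CLAIM (what is proved, stated in full; the proofs are below) =====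
def Claim_equal_max_move_player : Prop := ∀ (diagonal : Int), Dom_max_move_player diagonal → Spec_max_move_player diagonal (max_move_player diagonal)

-- ===== LEMMAS AND PROOFS =====

-- A's loop body, named for the proofs (definitionally the lambda in the port)
def pvStep (st : Int × Int) (i : Int) : Int × Int :=
  let max_move := if i = 2 then 2 else st.1
  if i > 2 then
    (max_move + st.2, if PySem.Int.mod i 2 ≠ 0 then st.2 + 2 else st.2)
  else
    (max_move, st.2)

lemma pvFold_inv (m : Nat) :
    ∃ q : Int,
      (PySem.List.pyRange 2 ((m : Int) + 2 + 1) 1).foldl pvStep (0, 2)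
        = (q, (m : Int) + 2 + ((m : Int) + 2) % 2)
      ∧ 2 * q = ((m : Int) + 2) * ((m : Int) + 2) - ((m : Int) + 2) % 2 := by
  induction m with
  | zero =>
    refine ⟨2, ?_, by decide⟩
    decide
  | succ k ih =>
    obtain ⟨q, hfold, hq⟩ := ih
    have hrange : PySem.List.pyRange 2 (((k : Nat) + 1 : Nat) + 2 + 1) 1
        = PySem.List.pyRange 2 ((k : Int) + 2 + 1) 1 ++ [(k : Int) + 3] := by
      have h1 : (((k : Nat) + 1 : Nat) : Int) + 2 + 1 = ((k : Int) + 3) + 1 := by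
        push_cast; ring
      have h2 : (k : Int) + 2 + 1 = (k : Int) + 3 := by ring
      rw [h1, PySem.List.pyRange_one_succ_right (by omega), h2]
    rw [hrange, List.foldl_append, hfold]
    have hmod : PySem.Int.mod ((k : Int) + 3) 2 = ((k : Int) + 3) % 2 := by
      exact PySem.Int.mod_eq_emod_of_pos (by norm_num)
    refine ⟨q + ((k : Int) + 2 + ((k : Int) + 2) % 2), ?_, ?_⟩
    · show pvStep (q, (k : Int) + 2 + ((k : Int) + 2) % 2) ((k : Int) + 3) = _
      simp only [pvStep, hmod]
      rw [if_neg (show (k : Int) + 3 ≠ 2 by omega), if_pos (show (k : Int) + 3 > 2 by omega)]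
      by_cases hpar : ((k : Int) + 3) % 2 = 0
      · rw [if_neg (by simp [hpar])]
        simp only [Prod.mk.injEq, true_and]
        omega
      · rw [if_pos (by simp [hpar])]
        simp only [Prod.mk.injEq, true_and]
        omega
    · have hsq : ((k : Int) + 1 + 2) * ((k : Int) + 1 + 2)
          = ((k : Int) + 2) * ((k : Int) + 2) + 2 * ((k : Int) + 2) + 1 := by ring
      push_cast
      rw [hsq]
      omega

lemma pvMain (d : Int) (hd : 2 ≤ d) :
    max_move_player d = PySem.Int.floordiv (d * d) 2 := by
  obtain ⟨m, hm⟩ : ∃ m : Nat, d = (m : Int) + 2 := ⟨(d - 2).toNat, by omega⟩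
  obtain ⟨q, hfold, hq⟩ := pvFold_inv m
  have hA : max_move_player d = q := by
    rw [max_move_player, hm]
    show ((PySem.List.pyRange 2 ((m : Int) + 2 + 1) 1).foldl pvStep (0, 2)).1 = q
    rw [hfold]
  rw [hA, hm]
  have hfd : PySem.Int.floordiv (((m : Int) + 2) * ((m : Int) + 2)) 2
      = (((m : Int) + 2) * ((m : Int) + 2)) / 2 := by
    rw [PySem.Int.floordiv_eq_ediv_of_pos (by omega)]
  rw [hfd]
  omega

-- ===== VERDICT (by name: the statement is the Claim_ definition above) =====
theorem max_move_player_spec : Claim_equal_max_move_player := by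
  intro d _
  show max_move_player d = max_move_player_alt d
  by_cases h : d < 2
  · have : d + 1 ≤ 2 := by omega
    simp [max_move_player, max_move_player_alt, PySem.List.pyRange_one_eq_nil this, h]
  · rw [max_move_player_alt, if_neg h, pvMain d (by omega)]
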